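-- pv_equiv track=rewrite | github.com/Fondamenti18/fondamenti-di-programmazione | students/1704985/homework01/program03.py | traduttore
-- ===== SOURCE A (Python) =====
-- def prima(testo):
--     prima=''
--     for C in testo:
--         if C>='a' and C<='z':
--             prima=prima+C
--     return prima
--
-- def intermedio1(testo):
--     chars=[]
--     for C in testo:
--         chars.append(C)
--     return chars
--
-- def intermedio2(lista):
--     lista.reverse()
--     lista2=[]
--     for i in lista:
--         if not(i in lista2):
--             lista2.insert(0,i)
--     return lista2
--
-- def poi(lista):
--     word= ''.join([str(i) for i in lista])
--     return word
--
-- def trovaChiave(testo):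
--     inizio=prima(testo)
--     int1=intermedio1(inizio)
--     int2=intermedio2(int1)
--     fine=poi(int2)
--     return fine
--
-- def ordine(testo):
--     list=intermedio1(testo)
--     list.sort()
--     ordinata=poi(list)
--     return ordinata
--
-- def traduttore(testo):
--     dict={}
--     chiave1=trovaChiave(testo)
--     chiave2=ordine(chiave1)
--     l=len(chiave1)
--     for i in range(0,l):
--         d= {chiave2[i] : chiave1[i]}
--         dict.update(d)
--     return dict
-- ===== SOURCE B (Python) =====
-- def traduttore(testo):
--     order = []
--     for c in testo:
--         if 'a' <= c <= 'z':
--             if c in order: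
--                 order.remove(c)
--             order.append(c)
--     return dict(zip(sorted(order), order))
-- ===== Notes on version B (the rewrite author's own statement) =====
-- stated objective: simpler
-- what changed: Replaces A's six-helper pipeline (filter lowercase, copy to list, reverse + membership-dedup with insert-at-front, join, sort, then a per-index dict.update loop) by one move-to-end pass that maintains the distinct lowercase letters in last-occurrence order, followed by dict(zip(sorted(order), order)).
import Mathlib
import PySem

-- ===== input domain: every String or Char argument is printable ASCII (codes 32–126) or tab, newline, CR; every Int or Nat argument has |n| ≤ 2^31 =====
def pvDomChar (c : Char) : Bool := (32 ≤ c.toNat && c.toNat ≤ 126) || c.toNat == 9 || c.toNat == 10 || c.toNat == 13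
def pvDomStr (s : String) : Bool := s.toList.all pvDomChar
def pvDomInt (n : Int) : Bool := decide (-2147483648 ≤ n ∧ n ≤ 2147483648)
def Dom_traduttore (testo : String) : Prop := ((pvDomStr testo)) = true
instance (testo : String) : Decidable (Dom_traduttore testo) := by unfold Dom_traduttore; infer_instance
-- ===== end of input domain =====

-- B replaces A's reverse + dedup-with-insert-at-front + per-index dict updates by a single
-- move-to-end pass and one zip (objective: simpler).  Python strings are ported as List Char
-- (PySem convention); the dict's one-character-string keys/values become String.ofList [c].

-- ===== PORT A =====
-- def prima(testo): keep the lowercase letters, appending each to an accumulator string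
def pvPrima (testo : List Char) : List Char :=
  testo.foldl (fun prima C => if 'a' ≤ C ∧ C ≤ 'z' then prima ++ [C] else prima) []

-- def intermedio1(testo): copy the characters into a list, one append at a time
def pvIntermedio1 (testo : List Char) : List Char :=
  testo.foldl (fun chars C => chars ++ [C]) []

-- def intermedio2(lista): lista.reverse() (in place, on A's local list), then dedup by
-- membership test, inserting each new element at position 0
def pvIntermedio2 (lista : List Char) : List Char :=
  lista.reverse.foldl
    (fun lista2 i => if i ∈ lista2 then lista2 else PySem.List.insert lista2 0 i) []

-- def poi(lista): ''.join([str(i) for i in lista])  (str of a 1-char string is itself)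
def pvPoi (lista : List Char) : List Char :=
  (lista.map (fun i => [i])).flatten

def pvTrovaChiave (testo : List Char) : List Char :=
  pvPoi (pvIntermedio2 (pvIntermedio1 (pvPrima testo)))

-- def ordine(testo): list(testo); list.sort(); join
def pvOrdine (testo : List Char) : List Char :=
  pvPoi (PySem.List.sorted (pvIntermedio1 testo) (fun x => x) false)

def traduttore (testo : String) : List (String × String) :=
  let chiave1 := pvTrovaChiave testo.toList
  let chiave2 := pvOrdine chiave1
  let l : Int := chiave1.length
  ((PySem.List.pyRange 0 l 1).foldl
      (fun d i => d.insert (String.ofList [PySem.List.pyGetD chiave2 i 'a'])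
                           (String.ofList [PySem.List.pyGetD chiave1 i 'a']))
      PySem.Dict.empty).items

-- ===== PORT B =====
def traduttore_alt (testo : String) : List (String × String) :=
  let order := testo.toList.foldl
      (fun order c =>
        if 'a' ≤ c ∧ c ≤ 'z' then (if c ∈ order then order.erase c else order) ++ [c]
        else order) []
  (PySem.Dict.ofList
      (((PySem.List.sorted order (fun x => x) false).zip order).map
        (fun p => (String.ofList [p.1], String.ofList [p.2])))).items

-- ===== PRECONDITION & SPEC =====
def Spec_traduttore (testo : String) (out : List (String × String)) : Prop := out = traduttore_alt testo
instance (testo : String) (out : List (String × String)) : Decidable (Spec_traduttore testo out) := by unfold Spec_traduttore; infer_instance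

-- ===== CLAIM (what is proved, stated in full; the proofs are below) =====
def Claim_equal_traduttore : Prop := ∀ (testo : String), Dom_traduttore testo → Spec_traduttore testo (traduttore testo)

-- ===== LEMMAS AND PROOFS =====

theorem pvPoi_eq (l : List Char) : pvPoi l = l := by
  induction l with
  | nil => rfl
  | cons x xs ih => simp [pvPoi] at ih ⊢; exact ih

theorem pvIntermedio1_eq (l : List Char) : pvIntermedio1 l = l := by
  simpa [pvIntermedio1] using PySem.List.foldl_append_singleton l []

theorem pvPrima_eq (l : List Char) :
    pvPrima l = l.filter (fun C => decide ('a' ≤ C ∧ C ≤ 'z')) := by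
  have h := PySem.List.foldl_append_if (fun C : Char => decide ('a' ≤ C ∧ C ≤ 'z'))
      (fun C => C) l []
  simp only [decide_eq_true_eq] at h
  simpa [pvPrima] using h

-- A's dedup loop: consing unseen elements builds PySem.Set.ofList, reversed
theorem consDedup_eq (l : List Char) :
    ∀ acc : List Char,
      l.foldl (fun lista2 i => if i ∈ lista2 then lista2 else PySem.List.insert lista2 0 i) acc
        = (l.foldl PySem.Set.add acc.reverse).reverse := by
  induction l with
  | nil => intro acc; simp
  | cons x xs ih =>
    intro acc
    by_cases hx : x ∈ acc
    · have : PySem.Set.add acc.reverse x = acc.reverse :=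
        PySem.Set.add_of_mem (by simpa using hx)
      simp only [List.foldl_cons, if_pos hx, this]
      exact ih acc
    · have : PySem.Set.add acc.reverse x = acc.reverse ++ [x] :=
        PySem.Set.add_of_not_mem (by simpa using hx)
      simp only [List.foldl_cons, if_neg hx, this, PySem.List.insert_zero]
      have := ih (x :: acc)
      simpa using this

theorem pvIntermedio2_eq (l : List Char) :
    pvIntermedio2 l = (PySem.Set.ofList l.reverse).reverse := by
  rw [pvIntermedio2, consDedup_eq, PySem.Set.ofList_eq_foldl]
  rfl

-- B's move-to-end step, named for the proofs
def pvMove (r : List Char) (c : Char) : List Char :=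
  (if c ∈ r then r.erase c else r) ++ [c]

-- the move-to-end fold computes last-occurrence order = reverse of ofList of the reverse
theorem moveFold_eq (s : List Char) :
    s.foldl pvMove [] = (PySem.Set.ofList s.reverse).reverse := by
  induction s using List.reverseRecOn with
  | nil => rfl
  | append_singleton s c ih =>
    rw [List.foldl_append, List.foldl_cons, List.foldl_nil, ih]
    rw [List.reverse_append]
    simp only [List.reverse_cons, List.reverse_nil, List.nil_append, List.singleton_append]
    rw [PySem.Set.ofList_cons]
    simp only [List.reverse_cons]
    set R := PySem.Set.ofList s.reverse with hR
    have hnd : R.Nodup := PySem.Set.nodup_ofList _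
    have hnd' : R.reverse.Nodup := List.nodup_reverse.mpr hnd
    unfold pvMove
    congr 1
    show (if c ∈ R.reverse then R.reverse.erase c else R.reverse) = (PySem.Set.discard R c).reverse
    have hdis : (PySem.Set.discard R c).reverse = R.reverse.filter (fun y => !(y == c)) := by
      simp [PySem.Set.discard, List.filter_reverse]
    rw [hdis]
    by_cases hc : c ∈ R.reverse
    · rw [if_pos hc, hnd'.erase_eq_filter c]
      apply List.filter_congr
      intro x _; simp [bne]
    · rw [if_neg hc]
      symm
      apply List.filter_eq_self.mpr
      intro x hx
      simp only [Bool.not_eq_eq_eq_not, Bool.not_true, beq_eq_false_iff_ne]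
      intro h; subst h; exact hc hx

-- a guarded fold is the fold over the filtered list
theorem guardFold_eq (p : Char → Prop) [DecidablePred p] (s : List Char) :
    ∀ acc : List Char,
      s.foldl (fun r c => if p c then pvMove r c else r) acc
        = (s.filter (fun c => decide (p c))).foldl pvMove acc := by
  induction s with
  | nil => intro acc; rfl
  | cons x xs ih =>
    intro acc
    by_cases hx : p x
    · simp only [List.foldl_cons, if_pos hx, List.filter_cons, decide_eq_true hx]
      exact ih _
    · simp only [List.foldl_cons, if_neg hx, List.filter_cons]
      rw [decide_eq_false hx]
      exact ih _

-- A's index loop over two equal-length lists is a fold over their zip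
theorem rangeFold_eq_zipFold {γ : Type} (f : γ → Char → Char → γ) :
    ∀ (xs ys : List Char), xs.length = ys.length →
    ∀ init : γ,
      (List.range xs.length).foldl (fun d k => f d (xs.getD k 'a') (ys.getD k 'a')) init
        = (xs.zip ys).foldl (fun d p => f d p.1 p.2) init := by
  intro xs
  induction xs with
  | nil => intro ys h init; rfl
  | cons x xs ih =>
    intro ys h init
    cases ys with
    | nil => simp at h
    | cons y ys =>
      simp only [List.length_cons, List.range_succ_eq_map, List.foldl_cons, List.foldl_map,
        List.zip_cons_cons]
      have hf : (fun (d : γ) (k : Nat) =>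
            f d ((x :: xs).getD (k.succ) 'a') ((y :: ys).getD (k.succ) 'a'))
          = fun d k => f d (xs.getD k 'a') (ys.getD k 'a') := by
        funext d k; rfl
      simp only [List.getD_cons_zero, hf]
      exact ih ys (by simpa using h) _

-- assemble: both ports compute Dict.ofList of the same pair list
theorem traduttore_eq_alt (testo : String) : traduttore testo = traduttore_alt testo := by
  unfold traduttore traduttore_alt
  dsimp only
  -- the deduplicated lowercase letters, in last-occurrence order
  have horder :
      testo.toList.foldl
        (fun order c =>
          if 'a' ≤ c ∧ c ≤ 'z' then (if c ∈ order then order.erase c else order) ++ [c]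
          else order) []
        = pvTrovaChiave testo.toList := by
    have h1 : testo.toList.foldl
        (fun order c =>
          if 'a' ≤ c ∧ c ≤ 'z' then (if c ∈ order then order.erase c else order) ++ [c]
          else order) []
        = testo.toList.foldl (fun r c => if 'a' ≤ c ∧ c ≤ 'z' then pvMove r c else r) [] := rfl
    rw [h1, guardFold_eq (fun c => 'a' ≤ c ∧ c ≤ 'z') testo.toList [], moveFold_eq]
    rw [pvTrovaChiave, pvPrima_eq, pvIntermedio1_eq, pvIntermedio2_eq, pvPoi_eq]
  rw [horder]
  set chiave1 := pvTrovaChiave testo.toList with hk1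
  have hord : pvOrdine chiave1 = PySem.List.sorted chiave1 (fun x => x) false := by
    rw [pvOrdine, pvIntermedio1_eq, pvPoi_eq]
  rw [hord]
  set chiave2 := PySem.List.sorted chiave1 (fun x => x) false with hk2
  have hlen : chiave2.length = chiave1.length := PySem.List.length_sorted _ _ _
  -- A's range loop becomes a fold over the zip
  have hrange :
      (PySem.List.pyRange 0 (chiave1.length : Int) 1).foldl
        (fun d i => d.insert (String.ofList [PySem.List.pyGetD chiave2 i 'a'])
                             (String.ofList [PySem.List.pyGetD chiave1 i 'a']))
        PySem.Dict.empty
      = (chiave2.zip chiave1).foldl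
          (fun d p => d.insert (String.ofList [p.1]) (String.ofList [p.2])) PySem.Dict.empty := by
    rw [PySem.List.pyRange_one, List.foldl_map]
    have hcast : ((chiave1.length : Int) - 0).toNat = chiave2.length := by
      simp [hlen]
    rw [hcast]
    have hf : (fun (d : PySem.Dict String String) (k : Nat) =>
          d.insert (String.ofList [PySem.List.pyGetD chiave2 ((0 : Int) + (k : Int)) 'a'])
                   (String.ofList [PySem.List.pyGetD chiave1 ((0 : Int) + (k : Int)) 'a']))
        = fun d k => d.insert (String.ofList [chiave2.getD k 'a']) (String.ofList [chiave1.getD k 'a']) := by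
      funext d k
      simp [PySem.List.pyGetD_natCast]
    rw [hf]
    exact rangeFold_eq_zipFold
      (fun d a b => d.insert (String.ofList [a]) (String.ofList [b])) chiave2 chiave1 (by omega)
      PySem.Dict.empty
  rw [hrange]
  -- B's dict(zip(...)) is literally the same fold
  rw [PySem.Dict.ofList, PySem.Dict.update, List.foldl_map]

-- ===== VERDICT (by name: the statement is the Claim_ definition above) =====
theorem traduttore_spec : Claim_equal_traduttore := by
  intro testo _
  unfold Spec_traduttore
  exact traduttore_eq_alt testo
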